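-- pv_equiv track=rewrite | github.com/RipeMangoBox/ResearchFlow | scripts/review_analysis_mismatch.py | parse_frontmatter_and_body
-- ===== SOURCE A (Python) =====
-- from typing import Dict, List, Tuple, Optional
--
-- def parse_frontmatter_and_body(text: str):
--     lines = text.splitlines()
--     if not lines or lines[0].strip() != "---":
--         return {}, text
--
--     front = {}
--     body_lines: List[str] = []
--     in_front = True
--     for idx, line in enumerate(lines[1:], start=1):
--         if in_front and line.strip() == "---":
--             body_lines = lines[idx + 1 :]
--             break
--         if in_front:
--             if ":" in line:
--                 key, value = line.split(":", 1)
--                 front[key.strip()] = value.strip()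
--         else:
--             body_lines.append(line)
--
--     if not body_lines:
--         return front, text
--     return front, "\n".join(body_lines)
-- ===== SOURCE B (Python) =====
-- def parse_frontmatter_and_body(text: str):
--     lines = text.splitlines()
--     if not lines or lines[0].strip() != "---":
--         return {}, text
--     close = None
--     for i in range(1, len(lines)):
--         if lines[i].strip() == "---":
--             close = i
--             break
--     front = {}
--     for line in lines[1:close]:
--         if ":" in line:
--             key, value = line.split(":", 1)
--             front[key.strip()] = value.strip()
--     if close is None:
--         return front, text
--     body_lines = lines[close + 1:]
--     if not body_lines:
--         return front, text
--     return front, "\n".join(body_lines)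
-- ===== Notes on version B (the rewrite author's own statement) =====
-- stated objective: simpler
-- what changed: Replaces A's single stateful loop (with in_front flag, break, and dead body-accumulation branch) by two plain passes: first find the index of the closing '---' line, then build the front dict from the slice before it and join the slice after it.
import Mathlib
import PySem

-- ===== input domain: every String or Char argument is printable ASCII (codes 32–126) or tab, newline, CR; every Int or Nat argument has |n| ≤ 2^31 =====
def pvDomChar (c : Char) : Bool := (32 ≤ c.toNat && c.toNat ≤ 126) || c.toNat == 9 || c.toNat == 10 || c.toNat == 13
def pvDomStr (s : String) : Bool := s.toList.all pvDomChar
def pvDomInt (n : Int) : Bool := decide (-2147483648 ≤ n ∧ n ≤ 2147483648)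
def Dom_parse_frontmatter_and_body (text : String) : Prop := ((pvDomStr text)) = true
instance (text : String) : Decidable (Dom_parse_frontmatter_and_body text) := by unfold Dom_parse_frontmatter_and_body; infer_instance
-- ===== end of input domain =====

-- B replaces A's single stateful break-loop by two plain passes (find the closing '---' index, then
-- build the front dict from the slice before it and join the slice after it); same cost, simpler.

-- ===== PORT A =====
-- A's loop over lines[1:]: state = (front, body_lines, in_front); 'break' at a '---' line returns
-- body_lines = the remaining tail. The in_front/else branch is kept exactly as in the Python.
def pvALoop : List String → PySem.Dict String String → List String → Bool →
    PySem.Dict String String × List String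
  | [], front, body, _ => (front, body)
  | line :: rest, front, body, inFront =>
    if inFront && (PySem.Str.strip line == "---") then
      (front, rest)
    else if inFront then
      if PySem.Str.isIn ":" line then
        match PySem.Str.splitMax? line ":" 1 with
        | some [key, value] =>
            pvALoop rest (front.insert (PySem.Str.strip key) (PySem.Str.strip value)) body inFront
        | _ => pvALoop rest front body inFront  -- unreachable: split(':',1) with ':' in line yields 2 parts
      else pvALoop rest front body inFront
    else pvALoop rest front (body ++ [line]) inFront

def parse_frontmatter_and_body (text : String) : (List (String × String)) × String :=
  match PySem.Str.splitlines text with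
  | [] => ([], text)
  | first :: rest =>
    if PySem.Str.strip first ≠ "---" then ([], text)
    else
      let (front, bodyLines) := pvALoop rest PySem.Dict.empty [] true
      if bodyLines = [] then (front.items, text)
      else (front.items, PySem.Str.join "\n" bodyLines)

-- ===== PORT B =====
-- pass 1: index of the first closing '---' line (within lines[1:]), or none
def pvBFindClose : List String → Option Nat
  | [] => none
  | line :: rest =>
    if PySem.Str.strip line == "---" then some 0 else (pvBFindClose rest).map (· + 1)

-- pass 2: the front dict from a slice of lines
def pvBFront (ls : List String) : PySem.Dict String String :=
  ls.foldl (fun front line =>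
    if PySem.Str.isIn ":" line then
      match PySem.Str.splitMax? line ":" 1 with
      | some [key, value] => front.insert (PySem.Str.strip key) (PySem.Str.strip value)
      | _ => front
    else front) PySem.Dict.empty

def parse_frontmatter_and_body_alt (text : String) : (List (String × String)) × String :=
  match PySem.Str.splitlines text with
  | [] => ([], text)
  | first :: rest =>
    if PySem.Str.strip first ≠ "---" then ([], text)
    else
      match pvBFindClose rest with
      | none => ((pvBFront rest).items, text)
      | some j =>
        let bodyLines := rest.drop (j + 1)
        if bodyLines = [] then ((pvBFront (rest.take j)).items, text)
        else ((pvBFront (rest.take j)).items, PySem.Str.join "\n" bodyLines)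

-- ===== PRECONDITION & SPEC =====
def Spec_parse_frontmatter_and_body (text : String) (out : (List (String × String)) × String) : Prop := out = parse_frontmatter_and_body_alt text
instance (text : String) (out : (List (String × String)) × String) : Decidable (Spec_parse_frontmatter_and_body text out) := by unfold Spec_parse_frontmatter_and_body; infer_instance

-- ===== CLAIM (what is proved, stated in full; the proofs are below) =====
def Claim_equal_parse_frontmatter_and_body : Prop := ∀ (text : String), Dom_parse_frontmatter_and_body text → Spec_parse_frontmatter_and_body text (parse_frontmatter_and_body text)

-- ===== LEMMAS AND PROOFS =====

-- the fold step shared by the two characterisations (used only in the proofs)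
def pvStep (front : PySem.Dict String String) (line : String) : PySem.Dict String String :=
  if PySem.Str.isIn ":" line then
    match PySem.Str.splitMax? line ":" 1 with
    | some [key, value] => front.insert (PySem.Str.strip key) (PySem.Str.strip value)
    | _ => front
  else front

lemma pvBFront_eq_foldl (ls : List String) : pvBFront ls = ls.foldl pvStep PySem.Dict.empty := rfl

lemma pvALoop_eq (rest : List String) :
    ∀ front : PySem.Dict String String,
      pvALoop rest front [] true =
        (match pvBFindClose rest with
         | none => (rest.foldl pvStep front, [])
         | some j => ((rest.take j).foldl pvStep front, rest.drop (j + 1))) := by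
  induction rest with
  | nil => intro front; rfl
  | cons line rest ih =>
    intro front
    by_cases h : PySem.Str.strip line == "---"
    · simp [pvALoop, pvBFindClose, h]
    · simp only [pvALoop, pvBFindClose, h, Bool.false_eq_true, if_false, if_true,
        Bool.and_false]
      have hstep : (if PySem.Str.isIn ":" line then
          match PySem.Str.splitMax? line ":" 1 with
          | some [key, value] =>
              pvALoop rest (front.insert (PySem.Str.strip key) (PySem.Str.strip value)) [] true
          | _ => pvALoop rest front [] true
        else pvALoop rest front [] true) = pvALoop rest (pvStep front line) [] true := by
        unfold pvStep
        split_ifs with h1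
        · cases hs : PySem.Str.splitMax? line ":" 1 with
          | none => rfl
          | some l =>
            match l with
            | [] => rfl
            | [_] => rfl
            | [_, _] => rfl
            | _ :: _ :: _ :: _ => rfl
        · rfl
      rw [hstep, ih (pvStep front line)]
      cases hf : pvBFindClose rest with
      | none => simp [List.foldl_cons]
      | some j => simp [List.foldl_cons]

theorem parse_frontmatter_and_body_eq (text : String) :
    parse_frontmatter_and_body text = parse_frontmatter_and_body_alt text := by
  unfold parse_frontmatter_and_body parse_frontmatter_and_body_alt
  cases hs : PySem.Str.splitlines text with
  | nil => rfl
  | cons first rest =>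
    by_cases h : PySem.Str.strip first ≠ "---"
    · simp [h]
    · simp only [h, if_false]
      rw [pvALoop_eq rest PySem.Dict.empty]
      cases hf : pvBFindClose rest with
      | none => simp [pvBFront_eq_foldl]
      | some j => simp [pvBFront_eq_foldl]

-- ===== VERDICT (by name: the statement is the Claim_ definition above) =====
theorem parse_frontmatter_and_body_spec : Claim_equal_parse_frontmatter_and_body := by
  intro text _
  unfold Spec_parse_frontmatter_and_body
  exact parse_frontmatter_and_body_eq text
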